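-- pv_equiv track=rewrite | github.com/sagemath/sage | src/sage/combinat/non_decreasing_parking_function.py | is_a
-- ===== SOURCE A (Python) =====
-- def is_a(x, n=None) -> bool:
--     """
--     Check whether a list is a non-decreasing parking function.
--
--     If a size `n` is specified, checks if a list is a non-decreasing
--     parking function of size `n`.
--
--     TESTS::
--
--         sage: from sage.combinat.non_decreasing_parking_function import is_a
--         sage: is_a([1,1,2])
--         True
--         sage: is_a([1,1,4])
--         False
--         sage: is_a([1,1,3], 3)
--         True
--     """
--     if not isinstance(x, (list, tuple)):
--         return False
--     prev = 1
--     for i, elt in enumerate(x):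
--         if prev > elt or elt > i + 1:
--             return False
--         prev = elt
--     return n is None or n == len(x)
-- ===== SOURCE B (Python) =====
-- def is_a(x, n=None) -> bool:
--     if not isinstance(x, (list, tuple)):
--         return False
--     nondecr = all(x[i] <= x[i + 1] for i in range(len(x) - 1))
--     bounds = all(1 <= e <= i + 1 for i, e in enumerate(x))
--     return nondecr and bounds and (n is None or n == len(x))
-- ===== Notes on version B (the rewrite author's own statement) =====
-- stated objective: simpler
-- what changed: Replaces A's single fused early-exit loop carrying a prev accumulator with two independent stateless property scans (adjacent non-decreasingness and per-position bounds) combined with the length check.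
import Mathlib
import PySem

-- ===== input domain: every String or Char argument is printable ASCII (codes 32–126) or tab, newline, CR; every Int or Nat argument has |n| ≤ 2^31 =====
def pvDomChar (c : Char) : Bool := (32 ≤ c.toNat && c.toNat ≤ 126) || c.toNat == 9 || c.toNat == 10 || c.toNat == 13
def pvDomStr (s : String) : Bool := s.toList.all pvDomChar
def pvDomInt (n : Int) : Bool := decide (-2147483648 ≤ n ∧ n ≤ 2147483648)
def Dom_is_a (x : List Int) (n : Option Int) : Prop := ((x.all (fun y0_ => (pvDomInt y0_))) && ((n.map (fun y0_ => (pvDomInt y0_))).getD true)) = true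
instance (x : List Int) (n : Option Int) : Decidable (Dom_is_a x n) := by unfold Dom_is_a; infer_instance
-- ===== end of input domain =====

-- B replaces A's fused early-exit loop (carrying prev) by two stateless property scans; same values, simpler.

-- ===== PORT A =====
-- A's for-loop over enumerate(x) with carried prev and early return False.
def isALoop : List Int → Int → Int → Bool
  | [], _, _ => true
  | elt :: rest, prev, i => if prev > elt || elt > i + 1 then false else isALoop rest elt (i + 1)

def is_a (x : List Int) (n : Option Int) : Bool :=
  -- isinstance(x, (list, tuple)) is always true under the type convention
  if isALoop x 1 0 then
    match n with
    | none => true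
    | some m => m == (x.length : Int)
  else false

-- ===== PORT B =====
-- all(x[i] <= x[i+1] ...): stateless adjacent-pair scan
def nondecrB : List Int → Bool
  | [] => true
  | [_] => true
  | a :: b :: rest => (a ≤ b) && nondecrB (b :: rest)

def is_a_alt (x : List Int) (n : Option Int) : Bool :=
  let nondecr := nondecrB x
  let bounds := (PySem.List.enumerate x).all (fun p => (1 ≤ p.2) && (p.2 ≤ p.1 + 1))
  nondecr && bounds && (match n with | none => true | some m => m == (x.length : Int))

-- ===== PRECONDITION & SPEC =====
def Spec_is_a (x : List Int) (n : Option Int) (out : Bool) : Prop := out = is_a_alt x n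
instance (x : List Int) (n : Option Int) (out : Bool) : Decidable (Spec_is_a x n out) := by unfold Spec_is_a; infer_instance

-- ===== CLAIM (what is proved, stated in full; the proofs are below) =====
def Claim_equal_is_a : Prop := ∀ (x : List Int) (n : Option Int), Dom_is_a x n → Spec_is_a x n (is_a x n)

-- ===== LEMMAS AND PROOFS =====

lemma isALoop_eq (xs : List Int) : ∀ (prev i : Int), 1 ≤ prev →
    isALoop xs prev i =
      (nondecrB (prev :: xs) &&
        (PySem.List.enumerate xs i).all (fun p => (1 ≤ p.2) && (p.2 ≤ p.1 + 1))) := by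
  induction xs with
  | nil => intro prev i _; simp [isALoop, nondecrB]
  | cons e rest ih =>
    intro prev i hprev
    by_cases h1 : prev ≤ e
    · by_cases h2 : e ≤ i + 1
      · have he : (1:Int) ≤ e := le_trans hprev h1
        simp [isALoop, nondecrB, PySem.List.enumerate_cons, h1, h2, he,
          not_lt.mpr h2, not_lt.mpr h1, ih e (i + 1) he]
      · simp only [isALoop, nondecrB, PySem.List.enumerate_cons, List.all_cons]
        simp [lt_of_not_ge h2]
    · simp only [isALoop, nondecrB, PySem.List.enumerate_cons, List.all_cons]
      simp [lt_of_not_ge h1]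

-- ===== VERDICT (by name: the statement is the Claim_ definition above) =====
theorem is_a_spec : Claim_equal_is_a := by
  intro x n _
  show is_a x n = is_a_alt x n
  unfold is_a is_a_alt
  rw [isALoop_eq x 1 0 le_rfl]
  cases x with
  | nil => cases n <;> simp [nondecrB]
  | cons e rest =>
    by_cases he : (1:Int) ≤ e
    · cases n <;> simp [nondecrB, PySem.List.enumerate_cons, he] <;> rfl
    · simp [nondecrB, PySem.List.enumerate_cons, he]
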